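-- pv_equiv track=rewrite | github.com/CopotM/cogsci2025inflhierarchy | src/graph_builder.py | index_duplicate_exponents
-- ===== SOURCE A (Python) =====
-- from collections import defaultdict
--
-- def index_duplicate_exponents(lexeme_dict):
--     """
--     Add indices to duplicate exponents within each lexeme.
--
--     Args:
--         lexeme_dict: Mapping from lexeme to list of exponents
--
--     Returns:
--         dict: Lexeme dict with indexed duplicate exponents
--     """
--     indexed_dict = {}
--
--     for idx, exps_list in lexeme_dict.items():
--         seen = defaultdict(int)
--         indexed_exps = []
--         for exp in exps_list:
--             seen[exp] += 1
--             if seen[exp] > 1: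
--                 indexed_exps.append(f"{exp}_{seen[exp] - 1}")
--             else:
--                 indexed_exps.append(exp)
--         indexed_dict[idx] = indexed_exps
--
--     return indexed_dict
-- ===== SOURCE B (Python) =====
-- def index_duplicate_exponents(lexeme_dict):
--     """
--     Add indices to duplicate exponents within each lexeme.
--
--     Two-pass grouped re-implementation: first build an index mapping each
--     exponent to the list of positions where it occurs, then allocate the
--     result list and scatter the (suffixed) names back by original position.
--     """
--     indexed_dict = {}
--     for lex, exps in lexeme_dict.items():
--         positions = {}
--         for i, exp in enumerate(exps):
--             positions.setdefault(exp, []).append(i)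
--         result = [None] * len(exps)
--         for exp, idxs in positions.items():
--             for k, i in enumerate(idxs):
--                 result[i] = exp if k == 0 else f"{exp}_{k}"
--         indexed_dict[lex] = result
--     return indexed_dict
-- ===== Notes on version B (the rewrite author's own statement) =====
-- stated objective: alternative
-- what changed: Replaced the single pass with a running-counter dict by a two-pass group-and-scatter scheme: first build a positions index mapping each exponent to the list of indices where it occurs, then allocate the result list and write exp / f"{exp}_{k}" back into it by original position, iterating the groups.
import Mathlib
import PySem

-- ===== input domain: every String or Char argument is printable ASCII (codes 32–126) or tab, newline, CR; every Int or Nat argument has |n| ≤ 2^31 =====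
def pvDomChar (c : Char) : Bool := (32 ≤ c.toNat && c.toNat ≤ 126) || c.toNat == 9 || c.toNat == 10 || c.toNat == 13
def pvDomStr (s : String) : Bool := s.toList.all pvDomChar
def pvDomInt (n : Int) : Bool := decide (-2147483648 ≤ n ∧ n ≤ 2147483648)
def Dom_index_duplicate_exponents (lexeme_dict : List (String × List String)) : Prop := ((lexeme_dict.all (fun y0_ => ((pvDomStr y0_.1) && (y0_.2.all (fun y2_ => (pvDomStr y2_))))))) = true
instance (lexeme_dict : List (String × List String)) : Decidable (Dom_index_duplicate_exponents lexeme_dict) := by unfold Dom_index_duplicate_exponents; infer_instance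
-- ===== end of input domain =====

-- B replaces A's single running-counter pass by a two-pass group-and-scatter scheme
-- (positions index per exponent, then write the suffixed names back by position); alternative decomposition, not faster.

-- ===== PORT A =====
-- inner loop body of A: 'seen[exp] += 1; append exp or f"{exp}_{seen[exp]-1}"' (defaultdict(int))
def pvStepA (st : PySem.Dict String Int × List String) (exp : String) :
    PySem.Dict String Int × List String :=
  let seen := st.1.modify exp 0 (· + 1)
  let c := seen.getD exp 0
  if c > 1 then (seen, st.2 ++ [exp ++ "_" ++ PySem.Int.toStr (c - 1)])
  else (seen, st.2 ++ [exp])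

def index_duplicate_exponents (lexeme_dict : List (String × List String)) :
    List (String × List String) :=
  (lexeme_dict.foldl
    (fun (indexed_dict : PySem.Dict String (List String)) p =>
      indexed_dict.insert p.1 (p.2.foldl pvStepA (PySem.Dict.empty, [])).2)
    PySem.Dict.empty).items

-- ===== PORT B =====
-- B's first pass: 'positions.setdefault(exp, []).append(i)' for i, exp in enumerate(exps)
def pvPositions (exps : List String) : PySem.Dict String (List Int) :=
  (PySem.List.enumerate exps 0).foldl
    (fun d q => d.modify q.2 [] (· ++ [q.1])) PySem.Dict.empty

-- B's written value: 'exp if k == 0 else f"{exp}_{k}"'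
def pvVal (exp : String) (k : Int) : String :=
  if k = 0 then exp else exp ++ "_" ++ PySem.Int.toStr k

-- B's scatter of one group: 'for k, i in enumerate(idxs): result[i] = ...';
-- every i comes from the first pass, so 0 ≤ i < len(result) and List.set at i.toNat is exact.
def pvScatter (result : List String) (p : String × List Int) : List String :=
  (PySem.List.enumerate p.2 0).foldl
    (fun r q => r.set q.2.toNat (pvVal p.1 q.1)) result

-- '[None] * len(exps)' becomes a list of "" placeholders: every slot is overwritten before the list is returned.
def index_duplicate_exponents_alt (lexeme_dict : List (String × List String)) :
    List (String × List String) :=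
  (lexeme_dict.foldl
    (fun (indexed_dict : PySem.Dict String (List String)) p =>
      indexed_dict.insert p.1
        ((pvPositions p.2).items.foldl pvScatter (p.2.map (fun _ => ""))))
    PySem.Dict.empty).items

-- ===== PRECONDITION & SPEC =====
def Spec_index_duplicate_exponents (lexeme_dict : List (String × List String)) (out : List (String × List String)) : Prop := out = index_duplicate_exponents_alt lexeme_dict
instance (lexeme_dict : List (String × List String)) (out : List (String × List String)) : Decidable (Spec_index_duplicate_exponents lexeme_dict out) := by unfold Spec_index_duplicate_exponents; infer_instance

-- ===== CLAIM (what is proved, stated in full; the proofs are below) =====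
def Claim_equal_index_duplicate_exponents : Prop := ∀ (lexeme_dict : List (String × List String)), Dom_index_duplicate_exponents lexeme_dict → Spec_index_duplicate_exponents lexeme_dict (index_duplicate_exponents lexeme_dict)

-- ===== LEMMAS AND PROOFS =====

-- the common per-element specification: position i gets pvVal xs[i] (count of xs[i] among xs[0..i))
def pvSpecOf (xs : List String) (i : Nat) : String :=
  pvVal (xs.getD i "") (((xs.take i).count (xs.getD i "") : Nat) : Int)

-- the ascending list of positions of e in xs, as B's first pass stores it
def pvIdxs (xs : List String) (e : String) : List Int :=
  ((PySem.List.enumerate xs 0).filter (fun q => q.2 == e)).map (·.1)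

-- helper equalities about map-over-range lists used by both B-side lemmas
lemma pvMap_range_congr {n : Nat} {f g : Nat → String}
    (h : ∀ i, i < n → f i = g i) :
    (List.range n).map f = (List.range n).map g := by
  apply List.ext_getElem (by simp)
  intro i h1 h2
  simp only [List.getElem_map, List.getElem_range]
  exact h i (by simpa using h1)

lemma pvSelf_map_range (r : List String) :
    (List.range r.length).map (fun i => r.getD i "") = r := by
  apply List.ext_getElem (by simp)
  intro i h1 h2
  simp only [List.getElem_map, List.getElem_range]
  exact List.getD_eq_getElem r "" h2

lemma pvSet_map_range (n : Nat) (f g : Nat → String) (v : String) (j : Nat)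
    (_hj : j < n) (hjv : g j = v) (hne : ∀ i, i < n → i ≠ j → f i = g i) :
    ((List.range n).map f).set j v = (List.range n).map g := by
  apply List.ext_getElem (by simp)
  intro i h1 h2
  rw [List.getElem_set]
  simp only [List.getElem_map, List.getElem_range]
  by_cases hij : j = i
  · rw [if_pos hij, ← hij, hjv]
  · rw [if_neg hij]
    exact hne i (by simpa using h2) (fun hh => hij hh.symm)

-- getD and pvSpecOf on positions strictly inside an appended list
lemma pvGetD_append_lt (ys : List String) (y : String) (i : Nat) (h : i < ys.length) :
    (ys ++ [y]).getD i "" = ys.getD i "" := by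
  simp [List.getD_eq_getElem?_getD, List.getElem?_append_left h]

lemma pvSpecOf_append_lt (ys : List String) (y : String) (i : Nat) (h : i < ys.length) :
    pvSpecOf (ys ++ [y]) i = pvSpecOf ys i := by
  unfold pvSpecOf
  rw [pvGetD_append_lt ys y i h, List.take_append_of_le_length (le_of_lt h)]

-- ---- A-side: the running-counter loop produces the spec values ----
lemma pvA_general (full : List String) :
    ∀ (xs pref : List String) (seen : PySem.Dict String Int) (acc : List String),
      pref ++ xs = full →
      (∀ e, seen.getD e 0 = (pref.count e : Int)) →
      (xs.foldl pvStepA (seen, acc)).2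
        = acc ++ (List.range' pref.length xs.length).map (pvSpecOf full) := by
  intro xs
  induction xs with
  | nil => intro pref seen acc _ _; simp
  | cons e rest ih =>
    intro pref seen acc hfull hinv
    have hc : (seen.modify e 0 (· + 1)).getD e 0 = (pref.count e : Int) + 1 := by
      rw [PySem.Dict.getD_modify_self, hinv]
    have hget : full.getD pref.length "" = e := by
      rw [← hfull]
      simp [List.getD_eq_getElem?_getD]
    have htake : full.take pref.length = pref := by
      rw [← hfull]; exact List.take_left
    have hspec : pvSpecOf full pref.length = pvVal e ((pref.count e : Nat) : Int) := by
      unfold pvSpecOf; rw [hget, htake]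
    have helem :
        pvStepA (seen, acc) e
          = (seen.modify e 0 (· + 1), acc ++ [pvSpecOf full pref.length]) := by
      unfold pvStepA
      rw [hspec]
      unfold pvVal
      simp only [hc]
      by_cases h0 : pref.count e = 0
      · simp [h0]
      · have h1 : (pref.count e : Int) + 1 > 1 := by
          have : 0 < pref.count e := Nat.pos_of_ne_zero h0
          exact_mod_cast by omega
        have h2 : ((pref.count e : Nat) : Int) ≠ 0 := by exact_mod_cast h0
        simp [h1, h0]
    rw [List.foldl_cons, helem]
    simp only [List.length_cons, List.range'_succ, List.map_cons]
    have hstep := ih (pref ++ [e]) (seen.modify e 0 (· + 1))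
      (acc ++ [pvSpecOf full pref.length])
      (by simpa [List.append_assoc] using hfull)
      (by
        intro e'
        rw [PySem.Dict.getD_modify]
        by_cases he : e' = e
        · subst he; simp [hinv, List.count_append]
        · simp [he, hinv, List.count_append, List.count_singleton]
          intro h; exact absurd h.symm he)
    rw [hstep]
    simp [List.append_assoc]

lemma pvA_eq (xs : List String) :
    (xs.foldl pvStepA (PySem.Dict.empty, [])).2
      = (List.range xs.length).map (pvSpecOf xs) := by
  have := pvA_general xs xs [] PySem.Dict.empty [] rfl
    (by intro e; simp [PySem.Dict.getD_empty])
  simpa [List.range_eq_range'] using this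

-- ---- B-side: the positions dict ----
lemma pvPositions_getD (xs : List String) (e : String) :
    (pvPositions xs).getD e [] = pvIdxs xs e := by
  unfold pvPositions pvIdxs
  have h : (PySem.List.enumerate xs 0).foldl
      (fun d q => d.modify q.2 [] (· ++ [q.1])) PySem.Dict.empty
      = ((PySem.List.enumerate xs 0).map (fun q => (q.2, q.1))).foldl
        (fun d p => d.modify p.1 [] (· ++ [p.2])) PySem.Dict.empty := by
    rw [List.foldl_map]
  rw [h, PySem.Dict.getD_foldl_modify_append]
  simp [PySem.Dict.getD_empty, List.filter_map, List.map_map, Function.comp_def]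

lemma pvPositions_keys (xs : List String) :
    (pvPositions xs).keys = PySem.Set.ofList xs := by
  unfold pvPositions
  rw [PySem.Dict.keys_foldl_modify_key]
  simp [PySem.List.map_snd_enumerate, PySem.Set.update_nil_left, PySem.Dict.keys_empty]

lemma pvPositions_nodup (xs : List String) : (pvPositions xs).keys.Nodup := by
  rw [pvPositions_keys]; exact PySem.Set.nodup_ofList xs

-- ---- B-side: characterisation of pvIdxs ----
lemma pvCountP_enum (e : String) :
    ∀ (xs : List String) (s : Int),
      (PySem.List.enumerate xs s).countP (fun q => q.2 == e) = xs.count e := by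
  intro xs
  induction xs with
  | nil => intro s; simp [PySem.List.enumerate_nil]
  | cons x rest ih =>
    intro s
    rw [PySem.List.enumerate_cons, List.countP_cons, List.count_cons, ih]

lemma pvIdxs_length (xs : List String) (e : String) :
    (pvIdxs xs e).length = xs.count e := by
  unfold pvIdxs
  rw [List.length_map, ← List.countP_eq_length_filter, pvCountP_enum]

lemma pvIdxs_append (ys : List String) (y e : String) :
    pvIdxs (ys ++ [y]) e
      = pvIdxs ys e ++ (if y = e then [(ys.length : Int)] else []) := by
  unfold pvIdxs
  rw [PySem.List.enumerate_append, List.filter_append, List.map_append]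
  by_cases h : y = e <;>
    simp [PySem.List.enumerate_cons, PySem.List.enumerate_nil, h]

-- ---- B-side: effect of scattering one group ----
lemma pvScatter_eq :
    ∀ (xs : List String) (e : String) (r : List String), xs.length ≤ r.length →
      pvScatter r (e, pvIdxs xs e)
        = (List.range r.length).map
            (fun i => if i < xs.length ∧ xs.getD i "" = e then pvSpecOf xs i
                      else r.getD i "") := by
  intro xs
  induction xs using List.reverseRecOn with
  | nil =>
    intro e r _
    unfold pvScatter pvIdxs
    simp only [PySem.List.enumerate_nil, List.filter_nil, List.map_nil,
      List.foldl_nil, List.length_nil, Nat.not_lt_zero, false_and, if_false]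
    exact (pvSelf_map_range r).symm
  | append_singleton ys y ih =>
    intro e r h
    have hylt : ys.length < r.length := by simpa using h
    have hys : ys.length ≤ r.length := le_of_lt hylt
    unfold pvScatter
    rw [pvIdxs_append, PySem.List.enumerate_append, List.foldl_append]
    have hihs : (PySem.List.enumerate (pvIdxs ys e) 0).foldl
        (fun r q => r.set q.2.toNat (pvVal e q.1)) r
        = (List.range r.length).map
            (fun i => if i < ys.length ∧ ys.getD i "" = e then pvSpecOf ys i
                      else r.getD i "") := by
      have := ih e r hys
      unfold pvScatter at this
      exact this
    by_cases hy : y = e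
    · subst hy
      rw [pvIdxs_length]
      simp only [if_pos rfl, PySem.List.enumerate_cons, PySem.List.enumerate_nil,
        List.foldl_cons, List.foldl_nil, hihs, Int.toNat_natCast, zero_add]
      apply pvSet_map_range _ _ _ _ _ hylt
      · -- the value written into the last position is its spec value
        have hg : (ys ++ [y]).getD ys.length "" = y := by
          simp [List.getD_eq_getElem?_getD]
        rw [if_pos ⟨by simp, hg⟩]
        unfold pvSpecOf
        rw [hg, List.take_left]
      · -- every other position keeps the value the ys-pass gave it
        intro i hi hne
        by_cases hlt : i < ys.length
        · rw [pvGetD_append_lt ys y i hlt, pvSpecOf_append_lt ys y i hlt]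
          by_cases hc : ys.getD i "" = y
          · rw [if_pos ⟨hlt, hc⟩, if_pos ⟨by simpa using Nat.lt_succ_of_lt hlt, hc⟩]
          · rw [if_neg (fun hh => hc hh.2), if_neg (fun hh => hc hh.2)]
        · have hge : ¬ i < (ys ++ [y]).length := by
            simp only [List.length_append, List.length_singleton]; omega
          rw [if_neg (fun hh => hlt hh.1), if_neg (fun hh => hge hh.1)]
    · -- y ≠ e: this group writes nothing at the last position
      simp only [if_neg hy, PySem.List.enumerate_nil, List.foldl_nil,
        List.append_nil, hihs]
      apply pvMap_range_congr
      intro i hi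
      by_cases hlt : i < ys.length
      · rw [pvGetD_append_lt ys y i hlt, pvSpecOf_append_lt ys y i hlt]
        by_cases hc : ys.getD i "" = e
        · rw [if_pos ⟨hlt, hc⟩, if_pos ⟨by simpa using Nat.lt_succ_of_lt hlt, hc⟩]
        · rw [if_neg (fun hh => hc hh.2), if_neg (fun hh => hc hh.2)]
      · by_cases hiy : i = ys.length
        · subst hiy
          have hg : (ys ++ [y]).getD ys.length "" = y := by
            simp [List.getD_eq_getElem?_getD]
          rw [if_neg (fun hh => hlt hh.1),
            if_neg (by rintro ⟨-, hc⟩; rw [hg] at hc; exact hy hc)]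
        · have hge : ¬ i < (ys ++ [y]).length := by
            simp only [List.length_append, List.length_singleton]; omega
          rw [if_neg (fun hh => hlt hh.1), if_neg (fun hh => hge hh.1)]

-- ---- B-side: folding the scatter over a list of keys ----
lemma pvFold_keys (xs : List String) :
    ∀ (K : List String) (r : List String), r.length = xs.length →
      K.foldl (fun r e => pvScatter r (e, pvIdxs xs e)) r
        = (List.range xs.length).map
            (fun i => if xs.getD i "" ∈ K then pvSpecOf xs i else r.getD i "") := by
  intro K
  induction K with
  | nil =>
    intro r hr
    simp only [List.foldl_nil, List.not_mem_nil, if_false]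
    rw [← hr, pvSelf_map_range]
  | cons e K' ih =>
    intro r hr
    rw [List.foldl_cons,
      pvScatter_eq xs e r (le_of_eq hr.symm), hr,
      ih _ (by simp)]
    apply pvMap_range_congr
    intro i hi
    have hget : ((List.range xs.length).map
        (fun i => if i < xs.length ∧ xs.getD i "" = e then pvSpecOf xs i
                  else r.getD i "")).getD i ""
        = if xs.getD i "" = e then pvSpecOf xs i else r.getD i "" := by
      rw [List.getD_eq_getElem?_getD, List.getElem?_map, List.getElem?_range hi,
        Option.map_some, Option.getD_some]
      by_cases hc : xs.getD i "" = e
      · rw [if_pos ⟨hi, hc⟩, if_pos hc]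
      · rw [if_neg (by tauto), if_neg hc]
    rw [hget]
    by_cases h1 : xs.getD i "" ∈ K'
    · rw [if_pos h1, if_pos (List.mem_cons_of_mem e h1)]
    · rw [if_neg h1]
      by_cases h2 : xs.getD i "" = e
      · rw [if_pos h2, if_pos (by rw [h2]; exact List.mem_cons_self)]
      · rw [if_neg h2, if_neg (fun hh => (List.mem_cons.mp hh).elim h2 h1)]

-- ---- B-side: the whole inner computation produces the spec values ----
lemma pvInnerB_eq (xs : List String) :
    (pvPositions xs).items.foldl pvScatter (xs.map (fun _ => ""))
      = (List.range xs.length).map (pvSpecOf xs) := by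
  rw [PySem.Dict.items_eq_map_keys _ (pvPositions_nodup xs) ([] : List Int),
    List.foldl_map]
  simp only [pvPositions_getD, pvPositions_keys]
  rw [pvFold_keys xs _ _ (by simp)]
  apply pvMap_range_congr
  intro i hi
  rw [if_pos]
  rw [PySem.Set.mem_ofList, List.getD_eq_getElem xs "" hi]
  exact List.getElem_mem hi

-- ===== VERDICT (by name: the statement is the Claim_ definition above) =====
theorem index_duplicate_exponents_spec : Claim_equal_index_duplicate_exponents := by
  intro lexeme_dict _
  unfold Spec_index_duplicate_exponents index_duplicate_exponents index_duplicate_exponents_alt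
  have hf : (fun (indexed_dict : PySem.Dict String (List String)) (p : String × List String) =>
        indexed_dict.insert p.1 (p.2.foldl pvStepA (PySem.Dict.empty, [])).2)
      = (fun (indexed_dict : PySem.Dict String (List String)) (p : String × List String) =>
        indexed_dict.insert p.1
          ((pvPositions p.2).items.foldl pvScatter (p.2.map (fun _ => "")))) := by
    funext d p
    rw [pvA_eq, pvInnerB_eq]
  rw [hf]
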